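-- pv_equiv track=rewrite | github.com/jinuk0211/video-lora | predata_app.py | validate_frame_count
-- ===== SOURCE A (Python) =====
-- def validate_frame_count(frames):
--     """Validate if frame count follows 4N+1 format and is within 5-81 range"""
--     if frames < 5 or frames > 81:
--         return False, f"Frame count must be between 5-81, current value: {frames}"
--
--     if (frames - 1) % 4 != 0:
--         # Find closest valid value
--         valid_values = [4*n + 1 for n in range(1, 21) if 5 <= 4*n + 1 <= 81]
--         closest = min(valid_values, key=lambda x: abs(x - frames))
--         return False, f"Frame count must follow 4N+1 format (N is positive integer), suggested: {closest}"
--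
--     return True, ""
-- ===== SOURCE B (Python) =====
-- def validate_frame_count(frames):
--     """Validate if frame count follows 4N+1 format and is within 5-81 range"""
--     if frames < 5 or frames > 81:
--         return False, f"Frame count must be between 5-81, current value: {frames}"
--     if (frames - 1) % 4 != 0:
--         # nearest 4N+1 value, computed arithmetically (floor division ties break low,
--         # matching min()'s first-minimum rule on the ascending list)
--         closest = 4 * (frames // 4) + 1
--         return False, f"Frame count must follow 4N+1 format (N is positive integer), suggested: {closest}"
--     return True, ""
-- ===== Notes on version B (the rewrite author's own statement) =====
-- stated objective: simpler
-- what changed: The list comprehension over range(1,21) plus min(..., key=abs distance) scan is replaced by the closed-form nearest valid value 4*(frames//4)+1, derived arithmetically (floor division reproduces min's low tie-break).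
import Mathlib
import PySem

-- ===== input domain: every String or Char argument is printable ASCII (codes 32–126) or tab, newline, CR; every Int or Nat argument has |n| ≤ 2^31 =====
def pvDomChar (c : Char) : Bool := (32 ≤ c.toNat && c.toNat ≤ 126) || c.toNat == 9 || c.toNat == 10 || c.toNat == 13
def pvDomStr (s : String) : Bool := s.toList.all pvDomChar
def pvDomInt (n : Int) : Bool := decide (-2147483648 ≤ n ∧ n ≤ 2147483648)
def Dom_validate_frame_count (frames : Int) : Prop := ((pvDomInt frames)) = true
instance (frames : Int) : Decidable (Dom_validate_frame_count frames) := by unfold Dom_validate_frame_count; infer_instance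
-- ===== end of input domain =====

-- B replaces A's build-a-list-and-scan for the nearest 4N+1 value by the closed form 4*(frames//4)+1.
-- ===== PORT A =====
def validate_frame_count (frames : Int) : Bool × String :=
  if frames < 5 ∨ 81 < frames then
    (false, "Frame count must be between 5-81, current value: " ++ PySem.Int.toStr frames)
  else if PySem.Int.mod (frames - 1) 4 ≠ 0 then
    let valid_values : List Int :=
      ((PySem.List.pyRange 1 21 1).filter
        (fun n => decide (5 ≤ 4*n+1) && decide (4*n+1 ≤ 81))).map (fun n => 4*n+1)
    -- min(valid_values, key=…); the list is statically nonempty, so the default is never used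
    let closest : Int := (PySem.List.min? valid_values (fun x => |x - frames|)).getD 0
    (false, "Frame count must follow 4N+1 format (N is positive integer), suggested: " ++ PySem.Int.toStr closest)
  else (true, "")

-- ===== PORT B =====
def validate_frame_count_alt (frames : Int) : Bool × String :=
  if frames < 5 ∨ 81 < frames then
    (false, "Frame count must be between 5-81, current value: " ++ PySem.Int.toStr frames)
  else if PySem.Int.mod (frames - 1) 4 ≠ 0 then
    (false, "Frame count must follow 4N+1 format (N is positive integer), suggested: "
      ++ PySem.Int.toStr (4 * PySem.Int.floordiv frames 4 + 1))
  else (true, "")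

-- ===== PRECONDITION & SPEC =====
def Spec_validate_frame_count (frames : Int) (out : Bool × String) : Prop := out = validate_frame_count_alt frames
instance (frames : Int) (out : Bool × String) : Decidable (Spec_validate_frame_count frames out) := by unfold Spec_validate_frame_count; infer_instance

-- ===== CLAIM (what is proved, stated in full; the proofs are below) =====
def Claim_equal_validate_frame_count : Prop := ∀ (frames : Int), Dom_validate_frame_count frames → Spec_validate_frame_count frames (validate_frame_count frames)

-- ===== LEMMAS AND PROOFS =====

-- ===== VERDICT (by name: the statement is the Claim_ definition above) =====
theorem validate_frame_count_spec : Claim_equal_validate_frame_count := by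
  intro frames _
  unfold Spec_validate_frame_count validate_frame_count validate_frame_count_alt
  split_ifs with h1 h2
  · rfl
  · -- in range 5..81 and (frames-1) % 4 ≠ 0: check every case
    push Not at h1
    obtain ⟨hlo, hhi⟩ := h1
    interval_cases frames <;> revert h2 <;> decide
  · rfl
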